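-- pv_equiv track=rewrite | github.com/MTES-MCT/access4all | erp/provider/entreprise.py | reorder_results
-- ===== SOURCE A (Python) =====
-- def reorder_results(results, terms):
--     # The idea is to reorder results with entries having the city name or postcode
--     # in the initial search terms
--     lower_rank = []
--     higher_rank = []
--     parts = [p.lower() for p in terms.split(" ")]
--     for result in results:
--         commune = result["commune"].lower()
--         code_postal = result["code_postal"].lower()
--         if any([part == commune or part == code_postal for part in parts]):
--             higher_rank.append(result)
--         else:
--             lower_rank.append(result)
--     return higher_rank + lower_rank
-- ===== SOURCE B (Python) =====
-- def reorder_results(results, terms):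
--     # Single stable sort on a binary key: matching results (key 0) come first,
--     # original relative order preserved inside each group.
--     parts = {p.lower() for p in terms.split(" ")}
--     def rank(result):
--         if result["commune"].lower() in parts or result["code_postal"].lower() in parts:
--             return 0
--         return 1
--     return sorted(results, key=rank)
-- ===== Notes on version B (the rewrite author's own statement) =====
-- stated objective: idiomatic
-- what changed: Instead of building two accumulator lists and concatenating them, B does one stable sort on a binary rank (0 = commune/postcode matches a lowercased search term, looked up in a set built once), letting sort stability reproduce the two-bucket order.
import Mathlib
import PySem

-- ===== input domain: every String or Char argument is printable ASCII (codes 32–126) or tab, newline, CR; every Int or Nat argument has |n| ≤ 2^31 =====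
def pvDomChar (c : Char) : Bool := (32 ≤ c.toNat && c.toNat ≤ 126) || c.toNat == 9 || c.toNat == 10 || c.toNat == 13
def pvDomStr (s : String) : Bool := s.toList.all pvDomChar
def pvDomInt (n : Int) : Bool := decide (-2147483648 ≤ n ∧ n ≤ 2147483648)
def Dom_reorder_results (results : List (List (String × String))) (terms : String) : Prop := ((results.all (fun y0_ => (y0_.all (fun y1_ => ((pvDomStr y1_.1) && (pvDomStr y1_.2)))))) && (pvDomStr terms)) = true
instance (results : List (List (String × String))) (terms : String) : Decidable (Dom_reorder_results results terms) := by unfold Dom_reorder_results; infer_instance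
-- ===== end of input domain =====

-- B replaces A's two accumulator lists + concatenation by one stable sort on a binary rank key.

-- ===== PORT A =====
-- result["k"]: first-match association-list lookup; Pre_ guarantees the key is present,
-- so the "" default of getD is never read.
def pvLookup (result : List (String × String)) (k : String) : String :=
  PySem.Dict.getD ⟨result⟩ k ""

def reorder_results (results : List (List (String × String))) (terms : String) : List (List (String × String)) :=
  let parts := ((PySem.Str.split? terms " ").getD []).map PySem.Str.lower
  let acc := results.foldl (fun (acc : List (List (String × String)) × List (List (String × String))) result =>
    let commune := PySem.Str.lower (pvLookup result "commune")
    let code_postal := PySem.Str.lower (pvLookup result "code_postal")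
    if parts.any (fun part => part == commune || part == code_postal) then
      (acc.1, acc.2 ++ [result])
    else
      (acc.1 ++ [result], acc.2)) ([], [])
  acc.2 ++ acc.1

-- ===== PORT B =====
def pvRank (parts : PySem.Set String) (result : List (String × String)) : Int :=
  if PySem.Set.contains parts (PySem.Str.lower (pvLookup result "commune"))
     || PySem.Set.contains parts (PySem.Str.lower (pvLookup result "code_postal"))
  then 0 else 1

def reorder_results_alt (results : List (List (String × String))) (terms : String) : List (List (String × String)) :=
  let parts := PySem.Set.ofList (((PySem.Str.split? terms " ").getD []).map PySem.Str.lower)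
  PySem.List.sorted results (pvRank parts) false

-- ===== PRECONDITION & SPEC =====
-- Pre_ excludes exactly the inputs where Python A raises KeyError: a result dict
-- missing the "commune" or "code_postal" key (B raises there too).
def Pre_reorder_results (results : List (List (String × String))) (terms : String) : Prop :=
  ∀ r ∈ results, (PySem.Dict.get? (⟨r⟩ : PySem.Dict String String) "commune").isSome
               ∧ (PySem.Dict.get? (⟨r⟩ : PySem.Dict String String) "code_postal").isSome
instance (results : List (List (String × String))) (terms : String) : Decidable (Pre_reorder_results results terms) := by unfold Pre_reorder_results; infer_instance

def pvWitness_reorder_results : (List (List (String × String))) × String :=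
  ([[("commune", "Lyon"), ("code_postal", "69001")], [("commune", "Paris"), ("code_postal", "75001")]], "lyon hotel")

def Spec_reorder_results (results : List (List (String × String))) (terms : String) (out : List (List (String × String))) : Prop := out = reorder_results_alt results terms
instance (results : List (List (String × String))) (terms : String) (out : List (List (String × String))) : Decidable (Spec_reorder_results results terms out) := by unfold Spec_reorder_results; infer_instance

-- ===== CLAIM (what is proved, stated in full; the proofs are below) =====
def Claim_equal_reorder_results : Prop := ∀ (results : List (List (String × String))) (terms : String), Dom_reorder_results results terms → Pre_reorder_results results terms → Spec_reorder_results results terms (reorder_results results terms)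

-- ===== LEMMAS AND PROOFS =====

-- insertBy puts x exactly between the prefix it does not go before and the suffix it does.
theorem insertBy_middle {α : Type} (before : α → α → Bool) (x : α) (A B : List α)
    (hA : ∀ a ∈ A, before x a = false) (hB : ∀ b ∈ B, before x b = true) :
    PySem.List.insertBy before x (A ++ B) = A ++ x :: B := by
  induction A with
  | nil =>
    cases B with
    | nil => rfl
    | cons b bs => simp [PySem.List.insertBy, hB b (by simp)]
  | cons a as ih =>
    have ha : before x a = false := hA a (by simp)
    simp only [List.cons_append, PySem.List.insertBy, ha]
    simp [ih (fun a h => hA a (by simp [h]))]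

-- Invariant of insertion sort with a 0/1-valued key: the accumulator stays
-- "rank-0 block ++ rank-1 block", each block in input order.
theorem foldl_insertBy_binary (key : List (String × String) → Int)
    (xs A B : List (List (String × String)))
    (hA : ∀ a ∈ A, key a = 0) (hB : ∀ b ∈ B, key b = 1)
    (hxs : ∀ x ∈ xs, key x = 0 ∨ key x = 1) :
    xs.foldl (fun acc x => PySem.List.insertBy (fun a b => decide (key a < key b)) x acc) (A ++ B)
      = (A ++ xs.filter (fun x => key x == 0)) ++ (B ++ xs.filter (fun x => key x == 1)) := by
  induction xs generalizing A B with
  | nil => simp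
  | cons x xs ih =>
    rcases hxs x (by simp) with h0 | h1
    · have : PySem.List.insertBy (fun a b => decide (key a < key b)) x (A ++ B)
          = (A ++ [x]) ++ B := by
        rw [insertBy_middle _ x A B
          (fun a ha => by simp [h0, hA a ha]) (fun b hb => by simp [h0, hB b hb])]
        simp
      simp only [List.foldl_cons, this]
      rw [ih (A ++ [x]) B
        (by intro a ha; rcases List.mem_append.mp ha with h | h
            · exact hA a h
            · simp at h; simp [h, h0])
        hB (fun y hy => hxs y (by simp [hy]))]
      simp [h0]
    · have : PySem.List.insertBy (fun a b => decide (key a < key b)) x (A ++ B)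
          = A ++ (B ++ [x]) := by
        rw [PySem.List.insertBy_of_forall_not_before _ x (A ++ B)
          (by intro y hy; rcases List.mem_append.mp hy with h | h
              · simp [h1, hA y h]
              · simp [h1, hB y h])]
        simp
      simp only [List.foldl_cons, this]
      rw [ih A (B ++ [x]) hA
        (by intro b hb; rcases List.mem_append.mp hb with h | h
            · exact hB b h
            · simp at h; simp [h, h1])
        (fun y hy => hxs y (by simp [hy]))]
      simp [h1]

-- A's match test (any over the parts list) agrees with B's rank key (set membership).
theorem cond_eq_rank (parts : List String) (r : List (String × String)) :
    (parts.any (fun part => part == PySem.Str.lower (pvLookup r "commune")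
                         || part == PySem.Str.lower (pvLookup r "code_postal")))
      = (pvRank (PySem.Set.ofList parts) r == 0) := by
  have hc : ∀ s : String, PySem.Set.contains (PySem.Set.ofList parts) s = decide (s ∈ parts) := by
    intro s
    simp [PySem.Set.contains, List.contains_eq_mem, PySem.Set.mem_ofList]
  rw [Bool.eq_iff_iff]
  simp only [pvRank, hc, List.any_eq_true, Bool.or_eq_true, beq_iff_eq, decide_eq_true_eq]
  generalize PySem.Str.lower (pvLookup r "commune") = c
  generalize PySem.Str.lower (pvLookup r "code_postal") = cp
  constructor
  · rintro ⟨x, hx, rfl | rfl⟩ <;> simp [hx]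
  · intro h
    by_cases h1 : c ∈ parts
    · exact ⟨_, h1, Or.inl rfl⟩
    · by_cases h2 : cp ∈ parts
      · exact ⟨_, h2, Or.inr rfl⟩
      · simp [h1, h2] at h

-- A's bucket loop computes the two filters of its branch condition.
theorem foldA_eq_filters (key : List (String × String) → Int)
    (xs L H : List (List (String × String))) :
    xs.foldl (fun (acc : List (List (String × String)) × List (List (String × String))) r =>
        if key r == 0 then (acc.1, acc.2 ++ [r]) else (acc.1 ++ [r], acc.2)) (L, H)
      = (L ++ xs.filter (fun r => !(key r == 0)), H ++ xs.filter (fun r => key r == 0)) := by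
  induction xs generalizing L H with
  | nil => simp
  | cons x xs ih =>
    simp only [List.foldl_cons, List.filter_cons]
    by_cases h : key x = 0
    · rw [if_pos (by simp [h]), ih]
      simp [h]
    · rw [if_neg (by simp [h]), ih]
      simp [h, List.append_assoc]

-- the rank key only takes the values 0 and 1, and "rank ≠ 0" is "rank = 1"
theorem rank_binary (parts : PySem.Set String) (r : List (String × String)) :
    pvRank parts r = 0 ∨ pvRank parts r = 1 := by
  unfold pvRank; split <;> simp

theorem not_zero_eq_one (parts : PySem.Set String) :
    (fun r => !(pvRank parts r == 0)) = (fun r => pvRank parts r == 1) := by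
  funext r; unfold pvRank; split <;> simp

-- insertion sort from the empty accumulator: the two rank blocks, in input order
theorem foldl_insertBy_binary_nil (key : List (String × String) → Int)
    (xs : List (List (String × String))) (hxs : ∀ x ∈ xs, key x = 0 ∨ key x = 1) :
    xs.foldl (fun acc x => PySem.List.insertBy (fun a b => decide (key a < key b)) x acc) []
      = xs.filter (fun x => key x == 0) ++ xs.filter (fun x => key x == 1) := by
  have h := foldl_insertBy_binary key xs [] [] (by simp) (by simp) hxs
  simpa using h

-- ===== VERDICT (by name: the statement is the Claim_ definition above) =====
theorem reorder_results_spec : Claim_equal_reorder_results := by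
  intro results terms _ _
  unfold Spec_reorder_results reorder_results reorder_results_alt
  dsimp only
  rw [PySem.List.sorted_eq_foldl_insertBy]
  rw [foldl_insertBy_binary_nil
        (pvRank (PySem.Set.ofList (((PySem.Str.split? terms " ").getD []).map PySem.Str.lower)))
        results (fun x _ => rank_binary _ x)]
  simp only [cond_eq_rank]
  rw [foldA_eq_filters]
  rw [not_zero_eq_one]
  simp
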